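-- pv_equiv track=rewrite | github.com/AndreyTulyakov/TextStageProcessor | stage_text_processor.py | formFrequencySet
-- ===== SOURCE A (Python) =====
-- def formFrequencySet(words_dict, sentence, minimal_support, minimal_size):
--     words_in_sentence = len(sentence)
--     result_groups = []
--
--     # Составляем последовательности начиная с каждого слова
--     for word_index in range(words_in_sentence):
--         word_group = []
--         for i in range(word_index, words_in_sentence):
--             current_word = sentence[i]
--             if(current_word == '"' or current_word == "'"):
--                 continue
--             else:
--                 if(words_dict.get(current_word, 0) >= minimal_support):
--                     word_group.append(current_word)
--                 else:
--                     break
--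
--         if(len(word_group) >= minimal_size):
--             result_groups.append(word_group)
--
--     return result_groups
-- ===== SOURCE B (Python) =====
-- def formFrequencySet(words_dict, sentence, minimal_support, minimal_size):
--     # Single right-to-left pass: the group starting at index i is built from
--     # the group starting at i+1 (quotes are transparent, unsupported words are barriers).
--     nxt = []
--     recorded = []
--     for w in reversed(sentence):
--         if w == '"' or w == "'":
--             cur = nxt
--         elif words_dict.get(w, 0) >= minimal_support:
--             cur = [w] + nxt
--         else:
--             cur = []
--         nxt = cur
--         if len(cur) >= minimal_size:
--             recorded.append(cur)
--     recorded.reverse()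
--     return recorded
-- ===== Notes on version B (the rewrite author's own statement) =====
-- stated objective: faster
-- what changed: Replaced the nested restart-at-every-index scan by a single right-to-left pass that derives the group starting at index i from the group starting at i+1 (quotes transparent, unsupported words reset it), recording qualifying groups and reversing at the end.
import Mathlib
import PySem

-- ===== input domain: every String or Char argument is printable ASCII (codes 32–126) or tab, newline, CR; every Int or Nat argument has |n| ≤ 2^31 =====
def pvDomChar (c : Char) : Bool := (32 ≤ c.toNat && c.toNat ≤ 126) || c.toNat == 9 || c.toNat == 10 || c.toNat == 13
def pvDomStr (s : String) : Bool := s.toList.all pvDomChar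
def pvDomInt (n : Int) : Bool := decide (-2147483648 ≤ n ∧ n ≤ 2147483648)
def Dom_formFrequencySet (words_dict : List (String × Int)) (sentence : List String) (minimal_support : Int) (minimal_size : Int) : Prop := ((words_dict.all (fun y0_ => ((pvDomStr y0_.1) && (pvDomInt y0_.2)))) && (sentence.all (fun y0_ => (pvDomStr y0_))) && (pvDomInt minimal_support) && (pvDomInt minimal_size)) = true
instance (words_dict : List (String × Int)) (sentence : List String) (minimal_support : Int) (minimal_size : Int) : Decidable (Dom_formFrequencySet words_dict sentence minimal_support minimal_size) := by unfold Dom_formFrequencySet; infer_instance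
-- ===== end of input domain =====

-- ===== PORT A =====
-- B replaces A's nested restart-at-every-index scan by one right-to-left pass reusing the group at i+1 for index i (measured faster on the generated inputs; same results).

-- A's inner loop from a start index, run over the corresponding suffix of sentence:
-- skip quotes, collect supported words, stop at the first unsupported word.
def innerGroup (words_dict : List (String × Int)) (minimal_support : Int) : List String → List String
  | [] => []
  | w :: rest =>
    if w == "\"" || w == "'" then innerGroup words_dict minimal_support rest
    else if minimal_support ≤ PySem.Dict.getD (PySem.Dict.mk words_dict) w 0 then
      w :: innerGroup words_dict minimal_support rest
    else []

def formFrequencySet (words_dict : List (String × Int)) (sentence : List String) (minimal_support : Int) (minimal_size : Int) : List (List String) :=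
  -- words_in_sentence = sentence.length; word_group = the inner loop's result, inlined
  (List.range sentence.length).foldl (fun result_groups word_index =>
    if minimal_size ≤ ((innerGroup words_dict minimal_support (sentence.drop word_index)).length : Int)
      then result_groups ++ [innerGroup words_dict minimal_support (sentence.drop word_index)]
      else result_groups) []

-- ===== PORT B =====
-- one step of B's right-to-left loop; state = (group starting just after here, recorded groups)
def altStep (words_dict : List (String × Int)) (minimal_support minimal_size : Int)
    (st : List String × List (List String)) (w : String) : List String × List (List String) :=
  let cur := if w == "\"" || w == "'" then st.1
             else if minimal_support ≤ PySem.Dict.getD (PySem.Dict.mk words_dict) w 0 then w :: st.1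
             else []
  (cur, if minimal_size ≤ (cur.length : Int) then st.2 ++ [cur] else st.2)

def formFrequencySet_alt (words_dict : List (String × Int)) (sentence : List String) (minimal_support : Int) (minimal_size : Int) : List (List String) :=
  let st := sentence.reverse.foldl (altStep words_dict minimal_support minimal_size) ([], [])
  st.2.reverse

-- ===== PRECONDITION & SPEC =====
def Spec_formFrequencySet (words_dict : List (String × Int)) (sentence : List String) (minimal_support : Int) (minimal_size : Int) (out : List (List String)) : Prop := out = formFrequencySet_alt words_dict sentence minimal_support minimal_size
instance (words_dict : List (String × Int)) (sentence : List String) (minimal_support : Int) (minimal_size : Int) (out : List (List String)) : Decidable (Spec_formFrequencySet words_dict sentence minimal_support minimal_size out) := by unfold Spec_formFrequencySet; infer_instance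

-- ===== CLAIM (what is proved, stated in full; the proofs are below) =====
def Claim_equal_formFrequencySet : Prop := ∀ (words_dict : List (String × Int)) (sentence : List String) (minimal_support : Int) (minimal_size : Int), Dom_formFrequencySet words_dict sentence minimal_support minimal_size → Spec_formFrequencySet words_dict sentence minimal_support minimal_size (formFrequencySet words_dict sentence minimal_support minimal_size)

-- ===== LEMMAS AND PROOFS =====

-- A's fold with a nonempty accumulator just prepends it.
theorem foldl_append_init (f : Nat → List String) (mz : Int) (l : List Nat) (init : List (List String)) :
    l.foldl (fun acc i => if mz ≤ ((f i).length : Int) then acc ++ [f i] else acc) init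
      = init ++ l.foldl (fun acc i => if mz ≤ ((f i).length : Int) then acc ++ [f i] else acc) [] := by
  induction l generalizing init with
  | nil => simp
  | cons x xs ih =>
    simp only [List.foldl_cons]
    rw [ih, ih (if mz ≤ ((f x).length : Int) then [] ++ [f x] else [])]
    split <;> simp

-- Head recursion for A: the group at index 0 (if large enough) followed by A on the tail.
theorem formFrequencySet_cons (wd : List (String × Int)) (w : String) (rest : List String) (ms mz : Int) :
    formFrequencySet wd (w :: rest) ms mz
      = (if mz ≤ ((innerGroup wd ms (w :: rest)).length : Int)
            then [innerGroup wd ms (w :: rest)] else [])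
        ++ formFrequencySet wd rest ms mz := by
  unfold formFrequencySet
  rw [List.length_cons, List.range_succ_eq_map]

  simp only [List.foldl_cons, List.foldl_map, List.drop_zero, List.drop_succ_cons]
  rw [foldl_append_init (fun i => innerGroup wd ms (rest.drop i)) mz]
  split <;> simp

-- B's loop state after consuming a sentence (from the right):
-- first component is the group starting at index 0, second collects (in reverse) what A collects.
theorem alt_state (wd : List (String × Int)) (ms mz : Int) : ∀ (s : List String),
    s.reverse.foldl (altStep wd ms mz) ([], [])
      = (innerGroup wd ms s, (formFrequencySet wd s ms mz).reverse) := by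
  intro s
  induction s with
  | nil => simp [formFrequencySet, innerGroup]
  | cons w rest ih =>
    have : (w :: rest).reverse = rest.reverse ++ [w] := by simp
    rw [this, List.foldl_append, ih]
    rw [formFrequencySet_cons]
    simp only [List.foldl_cons, List.foldl_nil, altStep, innerGroup]
    by_cases hq : (w == "\"" || w == "'") = true
    · simp only [hq]
      simp
      split <;> simp
    · simp only [hq]
      simp only [Bool.not_eq_true] at hq
      by_cases hs : ms ≤ PySem.Dict.getD (PySem.Dict.mk wd) w 0
      · simp [hs]
        split <;> simp
      · simp [hs]
        split <;> simp

-- ===== VERDICT (by name: the statement is the Claim_ definition above) =====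
theorem formFrequencySet_spec : Claim_equal_formFrequencySet := by
  intro wd s ms mz _
  unfold Spec_formFrequencySet formFrequencySet_alt
  rw [alt_state]
  simp
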